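-- pv_equiv track=rewrite | github.com/lexei1297/pythonDomashka | Class4/task1.py | create_chapters_dicts
-- ===== SOURCE A (Python) =====
-- def create_chapters_dicts(data):
--     chapters = []
--     current_chapter = {}
--     for line in data:
--         if line == "[new chapter]":
--             if current_chapter:
--                 chapters.append(current_chapter)
--             current_chapter = {}
--         elif line:
--             word = line.lower()
--             if word in current_chapter:
--                 current_chapter[word] += 1
--             else:
--                 current_chapter[word] = 1
--     if current_chapter:
--         chapters.append(current_chapter)
--     return chapters
-- ===== SOURCE B (Python) =====
-- def create_chapters_dicts(data):
--     # Two-phase: first partition lines into chapter groups, then count each group.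
--     groups = []
--     cur = []
--     for line in data:
--         if line == "[new chapter]":
--             groups.append(cur)
--             cur = []
--         else:
--             cur.append(line)
--     groups.append(cur)
--     result = []
--     for g in groups:
--         counts = {}
--         for line in g:
--             if line:
--                 w = line.lower()
--                 counts[w] = counts.get(w, 0) + 1
--         if counts:
--             result.append(counts)
--     return result
-- ===== Notes on version B (the rewrite author's own statement) =====
-- stated objective: alternative
-- what changed: Replaces A's single stateful loop (which interleaves counting, chapter cut-off and empty-dict suppression) with a two-phase decomposition: first partition the lines into chapter groups at '[new chapter]' markers, then count each group's non-empty lowercased lines into a dict and keep only the non-empty dicts.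
import Mathlib
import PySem

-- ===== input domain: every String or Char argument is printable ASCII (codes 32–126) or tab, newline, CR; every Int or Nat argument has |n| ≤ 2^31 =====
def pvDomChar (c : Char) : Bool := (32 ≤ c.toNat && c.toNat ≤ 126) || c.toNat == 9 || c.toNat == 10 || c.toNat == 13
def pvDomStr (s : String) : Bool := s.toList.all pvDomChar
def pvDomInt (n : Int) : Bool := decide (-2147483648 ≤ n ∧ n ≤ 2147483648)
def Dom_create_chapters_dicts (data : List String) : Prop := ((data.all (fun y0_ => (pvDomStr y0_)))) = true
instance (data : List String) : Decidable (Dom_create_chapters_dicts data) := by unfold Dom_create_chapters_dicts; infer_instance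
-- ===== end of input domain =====

-- B re-decomposes A's single stateful loop into two phases (partition into chapter groups, then count each group); equal return values, no speed claim.

-- ===== PORT A =====
-- the body of A's for-loop over (chapters, current_chapter)
def pvStepA (st : List (PySem.Dict String Int) × PySem.Dict String Int) (line : String) :
    List (PySem.Dict String Int) × PySem.Dict String Int :=
  if line = "[new chapter]" then
    (if st.2.items.isEmpty then st.1 else st.1 ++ [st.2], PySem.Dict.empty)
  else if line ≠ "" then
    let w := PySem.Str.lower line
    (st.1, if st.2.contains w then st.2.insert w (st.2.getD w 0 + 1) else st.2.insert w 1)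
  else st

def create_chapters_dicts (data : List String) : List (List (String × Int)) :=
  let st := data.foldl pvStepA ([], PySem.Dict.empty)
  (if st.2.items.isEmpty then st.1 else st.1 ++ [st.2]).map (fun d => d.items)

-- ===== PORT B =====
-- phase 1: split the lines into chapter groups at "[new chapter]" markers
def pvSplitStep (st : List (List String) × List String) (line : String) :
    List (List String) × List String :=
  if line = "[new chapter]" then (st.1 ++ [st.2], []) else (st.1, st.2 ++ [line])

-- phase 2, inner loop: count one line into the group's dict (skipping empty lines)
def pvCountStep (d : PySem.Dict String Int) (line : String) : PySem.Dict String Int :=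
  if line ≠ "" then
    let w := PySem.Str.lower line
    d.insert w (d.getD w 0 + 1)
  else d

def pvCountGroup (g : List String) : PySem.Dict String Int :=
  g.foldl pvCountStep PySem.Dict.empty

def create_chapters_dicts_alt (data : List String) : List (List (String × Int)) :=
  let st := data.foldl pvSplitStep ([], [])
  (st.1 ++ [st.2]).foldl
    (fun res g =>
      let c := pvCountGroup g
      if c.items.isEmpty then res else res ++ [c.items]) []

-- ===== PRECONDITION & SPEC =====
def Spec_create_chapters_dicts (data : List String) (out : List (List (String × Int))) : Prop := out = create_chapters_dicts_alt data
instance (data : List String) (out : List (List (String × Int))) : Decidable (Spec_create_chapters_dicts data out) := by unfold Spec_create_chapters_dicts; infer_instance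

-- ===== CLAIM (what is proved, stated in full; the proofs are below) =====
def Claim_equal_create_chapters_dicts : Prop := ∀ (data : List String), Dom_create_chapters_dicts data → Spec_create_chapters_dicts data (create_chapters_dicts data)

-- ===== LEMMAS AND PROOFS =====

-- the dicts B would emit for a list of groups (non-empty counts only)
def pvEmit (gs : List (List String)) : List (PySem.Dict String Int) :=
  (gs.map pvCountGroup).filter (fun c => !c.items.isEmpty)

theorem pvEmit_append_singleton (gs : List (List String)) (g : List String) :
    pvEmit (gs ++ [g]) =
      pvEmit gs ++ (if (pvCountGroup g).items.isEmpty then [] else [pvCountGroup g]) := by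
  simp only [pvEmit, List.map_append, List.filter_append, List.map_cons, List.map_nil,
    List.filter_cons, List.filter_nil]
  split_ifs with h <;> simp_all

theorem pvCountGroup_append_singleton (cur : List String) (line : String) :
    pvCountGroup (cur ++ [line]) = pvCountStep (pvCountGroup cur) line := by
  simp [pvCountGroup, List.foldl_append]

-- B's emission foldl, characterised
theorem pvEmit_foldl (gs : List (List String)) (res : List (List (String × Int))) :
    gs.foldl
      (fun res g =>
        let c := pvCountGroup g
        if c.items.isEmpty then res else res ++ [c.items]) res
    = res ++ (pvEmit gs).map (fun d => d.items) := by
  induction gs generalizing res with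
  | nil => simp [pvEmit]
  | cons g t ih =>
    have he : pvEmit (g :: t) =
        if (pvCountGroup g).items.isEmpty then pvEmit t else pvCountGroup g :: pvEmit t := by
      simp only [pvEmit, List.map_cons, List.filter_cons]
      split_ifs with h <;> simp_all
    simp only [List.foldl_cons, he]
    split_ifs with h
    · exact ih res
    · rw [ih]; simp [List.append_assoc]

-- the loop invariant tying A's fold to B's split fold
theorem pvInv (data : List String) : ∀ (gs : List (List String)) (cur : List String),
    data.foldl pvStepA (pvEmit gs, pvCountGroup cur)
    = (pvEmit (data.foldl pvSplitStep (gs, cur)).1,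
       pvCountGroup (data.foldl pvSplitStep (gs, cur)).2) := by
  induction data with
  | nil => intro gs cur; rfl
  | cons line rest ih =>
    intro gs cur
    simp only [List.foldl_cons]
    by_cases h1 : line = "[new chapter]"
    · have hs : pvStepA (pvEmit gs, pvCountGroup cur) line
          = (pvEmit (gs ++ [cur]), pvCountGroup []) := by
        simp [pvStepA, h1, pvEmit_append_singleton, pvCountGroup]
        split_ifs with h <;> simp
      have hsp : pvSplitStep (gs, cur) line = (gs ++ [cur], []) := by
        simp [pvSplitStep, h1]
      rw [hs, hsp, ih]
    · have hsp : pvSplitStep (gs, cur) line = (gs, cur ++ [line]) := by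
        simp [pvSplitStep, h1]
      by_cases h2 : line = ""
      · have hs : pvStepA (pvEmit gs, pvCountGroup cur) line
            = (pvEmit gs, pvCountGroup (cur ++ [line])) := by
          simp [pvStepA, h2, pvCountGroup_append_singleton, pvCountStep]
        rw [hs, hsp, ih]
      · have hs : pvStepA (pvEmit gs, pvCountGroup cur) line
            = (pvEmit gs, pvCountGroup (cur ++ [line])) := by
          simp only [pvStepA, pvCountGroup_append_singleton, pvCountStep, h1, h2,
            if_false, ne_eq, not_false_iff, if_true]
          by_cases hc : (pvCountGroup cur).contains (PySem.Str.lower line)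
          · simp [hc]
          · simp only [hc, if_false, Bool.false_eq_true]
            rw [PySem.Dict.getD_of_not_contains _ _ (by simpa using hc)]
            norm_num
        rw [hs, hsp, ih]

-- ===== VERDICT (by name: the statement is the Claim_ definition above) =====
theorem create_chapters_dicts_spec : Claim_equal_create_chapters_dicts := by
  intro data _
  show create_chapters_dicts data = create_chapters_dicts_alt data
  unfold create_chapters_dicts create_chapters_dicts_alt
  have h0 : (pvEmit [], pvCountGroup []) = (([] : List (PySem.Dict String Int)), PySem.Dict.empty) := rfl
  rw [pvEmit_foldl, ← h0, pvInv]
  rw [pvEmit_append_singleton]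
  split_ifs with h <;> simp [h]
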